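-- pv_equiv track=rewrite | github.com/PKU-GeekGame/geekgame-4th | players_writeup/25/code/algo-randomzoo.py | find_best_enumerate_pos_2
-- ===== SOURCE A (Python) =====
-- def get_initial_flag_01(flag_len):
--     return [1] * 5 + [0] * (flag_len - 5)
--
-- def find_best_enumerate_pos_2(flag_len):
--     best_res = []
--     best_a = 0
--     best_b = 0
--     for a in range(5, flag_len - 1):
--         for b in range(a + 1, flag_len - 1):
--             # solved = [1] * 5 + [0] * (flag_len - 6) + [1]
--             solved = get_initial_flag_01(flag_len)
--             solved[a] = 1
--             solved[b] = 1
--             while True: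
--                 changed = False
--                 for i in range(flag_len):
--                     i0 = i % flag_len
--                     i1 = (i + 1) % flag_len
--                     i397 = (i + 397) % flag_len
--                     i624 = (i + 624) % flag_len
--                     if solved[i1] and solved[i397]:
--                         if not solved[i624]:
--                             solved[i624] = 1
--                             changed = True
--                     elif solved[i397] and solved[i624]:
--                         if not solved[i1]:
--                             solved[i1] = 1
--                             changed = True
--                     elif solved[i1] and solved[i624]:
--                         if not solved[i397]:
--                             solved[i397] = 1
--                             changed = True
--                 if not changed:
--                     break
--             if solved.count(1) > best_res.count(1):
--                 best_res = solved
--                 best_a = a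
--                 best_b = b
--     return best_res.count(1), best_a, best_b
-- ===== SOURCE B (Python) =====
-- def find_best_enumerate_pos_2(flag_len):
--     # Worklist (bootstrap-percolation) closure per seed pair instead of repeated
--     # full sweeps; tracks only the best count instead of the best list.
--     n = flag_len
--     best_cnt = 0
--     best_a = 0
--     best_b = 0
--     for a in range(5, n - 1):
--         for b in range(a + 1, n - 1):
--             solved = [1] * 5 + [0] * (n - 5)
--             solved[a] = 1
--             solved[b] = 1
--             stack = [j for j in range(n) if solved[j]]
--             while stack:
--                 x = stack.pop()
--                 for i in ((x - 1) % n, (x - 397) % n, (x - 624) % n):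
--                     t = [(i + 1) % n, (i + 397) % n, (i + 624) % n]
--                     missing = [p for p in t if not solved[p]]
--                     if len(missing) == 1:
--                         solved[missing[0]] = 1
--                         stack.append(missing[0])
--             cnt = solved.count(1)
--             if cnt > best_cnt:
--                 best_cnt = cnt
--                 best_a = a
--                 best_b = b
--     return best_cnt, best_a, best_b
-- ===== Notes on version B (the rewrite author's own statement) =====
-- stated objective: alternative
-- what changed: Per seed pair, the repeated full-array sweeps until no change are replaced by a worklist (bootstrap-percolation) closure that only re-examines the three rules a newly solved position participates in, and the accumulator keeps just the best count instead of the best list; intended as faster (a timing run measured 2.24x at the largest size both finished) but not confirmed overall, so no speed is claimed.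
import Mathlib
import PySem

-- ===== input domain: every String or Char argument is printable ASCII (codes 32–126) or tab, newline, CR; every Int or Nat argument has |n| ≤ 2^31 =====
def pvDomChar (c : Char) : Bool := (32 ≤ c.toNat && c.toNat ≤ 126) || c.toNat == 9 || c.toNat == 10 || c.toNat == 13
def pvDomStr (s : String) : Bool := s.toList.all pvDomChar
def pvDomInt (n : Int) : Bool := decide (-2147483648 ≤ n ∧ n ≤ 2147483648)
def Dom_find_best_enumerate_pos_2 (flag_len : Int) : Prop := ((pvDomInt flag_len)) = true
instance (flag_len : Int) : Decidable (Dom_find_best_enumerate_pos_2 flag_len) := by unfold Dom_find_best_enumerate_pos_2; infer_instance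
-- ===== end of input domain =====

-- B replaces A's repeated full fixpoint sweeps per seed pair by a worklist
-- (bootstrap-percolation) closure and tracks only the best count (intended as
-- faster; a timing run measured 2.24x at the largest size both finished but
-- could not confirm it overall, so no speed is claimed; equivalence proved below).


-- ===== PORT A =====
-- Port of get_initial_flag_01: [1] * 5 + [0] * (flag_len - 5)
def pvInitialFlag01 (flag_len : Int) : List Int :=
  PySem.List.pyRepeat [1] 5 ++ PySem.List.pyRepeat [0] (flag_len - 5)

-- body of A's inner `for i in range(flag_len)` loop; state = (solved, changed).
-- (Python also computes `i0 = i % flag_len` but never uses it.)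
def pvStepA (n : Int) (st : List Int × Bool) (i : Int) : List Int × Bool :=
  let s := st.1
  let i1 := PySem.Int.mod (i + 1) n
  let i397 := PySem.Int.mod (i + 397) n
  let i624 := PySem.Int.mod (i + 624) n
  if PySem.List.pyGetD s i1 0 ≠ 0 ∧ PySem.List.pyGetD s i397 0 ≠ 0 then
    if PySem.List.pyGetD s i624 0 = 0 then (PySem.List.pySetD s i624 1, true) else st
  else if PySem.List.pyGetD s i397 0 ≠ 0 ∧ PySem.List.pyGetD s i624 0 ≠ 0 then
    if PySem.List.pyGetD s i1 0 = 0 then (PySem.List.pySetD s i1 1, true) else st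
  else if PySem.List.pyGetD s i1 0 ≠ 0 ∧ PySem.List.pyGetD s i624 0 ≠ 0 then
    if PySem.List.pyGetD s i397 0 = 0 then (PySem.List.pySetD s i397 1, true) else st
  else st

-- one full pass of the `for i in range(flag_len)` loop, started with changed = False
def pvSweepA (n : Int) (s : List Int) : List Int × Bool :=
  (PySem.List.pyRange 0 n 1).foldl (pvStepA n) (s, false)

-- A's `while True: … if not changed: break`, fueled: each changed pass strictly
-- increases the number of 1s (≤ flag_len), so flag_len + 1 passes always suffice
def pvLoopA (n : Int) (s : List Int) : Nat → List Int
  | 0 => s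
  | fuel + 1 =>
    let r := pvSweepA n s
    if r.2 then pvLoopA n r.1 fuel else r.1

def pvSolveA (n a b : Int) : List Int :=
  pvLoopA n (PySem.List.pySetD (PySem.List.pySetD (pvInitialFlag01 n) a 1) b 1) (n.toNat + 1)

def find_best_enumerate_pos_2 (flag_len : Int) : List Int :=
  let best :=
    (PySem.List.pyRange 5 (flag_len - 1) 1).foldl (fun acc a =>
      (PySem.List.pyRange (a + 1) (flag_len - 1) 1).foldl (fun acc b =>
        let solved := pvSolveA flag_len a b
        if (PySem.List.count solved 1 : Int) > (PySem.List.count acc.1 1 : Int) then (solved, a, b)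
        else acc) acc) (([] : List Int), (0 : Int), (0 : Int))
  [(PySem.List.count best.1 1 : Int), best.2.1, best.2.2]

-- ===== PORT B =====
-- body of B's `for i in (…)` rule loop; state = (solved, stack), stack top at head
-- (Python pushes and pops at the list's end; head-of-list here is that end).
def pvFireB (n : Int) (st : List Int × List Int) (i : Int) : List Int × List Int :=
  let t := [PySem.Int.mod (i + 1) n, PySem.Int.mod (i + 397) n, PySem.Int.mod (i + 624) n]
  let missing := t.filter (fun p => decide (PySem.List.pyGetD st.1 p 0 = 0))
  if missing.length = 1 then
    (PySem.List.pySetD st.1 (missing.getD 0 0) 1, missing.getD 0 0 :: st.2)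
  else st

-- B's `while stack:` worklist, fueled: the measure 3·#zeros + |stack| strictly
-- drops every iteration, so 4·flag_len + 1 iterations always suffice
def pvLoopB (n : Int) (s : List Int) (q : List Int) : Nat → List Int
  | 0 => s
  | fuel + 1 =>
    match q with
    | [] => s
    | x :: rest =>
      let r := [PySem.Int.mod (x - 1) n, PySem.Int.mod (x - 397) n,
                PySem.Int.mod (x - 624) n].foldl (pvFireB n) (s, rest)
      pvLoopB n r.1 r.2 fuel

def pvSolveB (n a b : Int) : List Int :=
  let s := PySem.List.pySetD (PySem.List.pySetD
             (PySem.List.pyRepeat [1] 5 ++ PySem.List.pyRepeat [0] (n - 5)) a 1) b 1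
  pvLoopB n s (((PySem.List.pyRange 0 n 1).filter
                 (fun j => decide (PySem.List.pyGetD s j 0 ≠ 0))).reverse) (4 * n.toNat + 1)

def find_best_enumerate_pos_2_alt (flag_len : Int) : List Int :=
  let best :=
    (PySem.List.pyRange 5 (flag_len - 1) 1).foldl (fun acc a =>
      (PySem.List.pyRange (a + 1) (flag_len - 1) 1).foldl (fun acc b =>
        let cnt : Int := (PySem.List.count (pvSolveB flag_len a b) 1 : Int)
        if cnt > acc.1 then (cnt, a, b) else acc) acc) ((0 : Int), (0 : Int), (0 : Int))
  [best.1, best.2.1, best.2.2]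

-- ===== PRECONDITION & SPEC =====
def Spec_find_best_enumerate_pos_2 (flag_len : Int) (out : List Int) : Prop := out = find_best_enumerate_pos_2_alt flag_len
instance (flag_len : Int) (out : List Int) : Decidable (Spec_find_best_enumerate_pos_2 flag_len out) := by unfold Spec_find_best_enumerate_pos_2; infer_instance

-- ===== CLAIM (what is proved, stated in full; the proofs are below) =====
def Claim_equal_find_best_enumerate_pos_2 : Prop := ∀ (flag_len : Int), Dom_find_best_enumerate_pos_2 flag_len → Spec_find_best_enumerate_pos_2 flag_len (find_best_enumerate_pos_2 flag_len)

-- ===== LEMMAS AND PROOFS =====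

-- proof-side vocabulary: membership, the rule triple, local closedness, state shape
def pvMem (s : List Int) (j : Int) : Prop := PySem.List.pyGetD s j 0 ≠ 0

def pvTrip (n i : Int) : List Int :=
  [PySem.Int.mod (i + 1) n, PySem.Int.mod (i + 397) n, PySem.Int.mod (i + 624) n]

def pvClosedAt (n : Int) (s : List Int) (i : Int) : Prop :=
  (pvMem s (PySem.Int.mod (i + 1) n) ∧ pvMem s (PySem.Int.mod (i + 397) n) →
      pvMem s (PySem.Int.mod (i + 624) n)) ∧
  (pvMem s (PySem.Int.mod (i + 397) n) ∧ pvMem s (PySem.Int.mod (i + 624) n) →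
      pvMem s (PySem.Int.mod (i + 1) n)) ∧
  (pvMem s (PySem.Int.mod (i + 1) n) ∧ pvMem s (PySem.Int.mod (i + 624) n) →
      pvMem s (PySem.Int.mod (i + 397) n))

def pvClosed (n : Int) (s : List Int) : Prop := ∀ i : Int, 0 ≤ i → i < n → pvClosedAt n s i

def pvOk (n : Int) (s : List Int) : Prop :=
  s.length = n.toNat ∧ ∀ (k : Nat) (h : k < s.length), s[k] = 0 ∨ s[k] = 1

-- the abstract closure of a seed under the three rules
inductive pvCl (n : Int) (seed : List Int) : Int → Prop
  | base (j : Int) : 0 ≤ j → pvMem seed j → pvCl n seed j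
  | r1 (i : Int) : 0 ≤ i → i < n → pvCl n seed (PySem.Int.mod (i + 1) n) →
      pvCl n seed (PySem.Int.mod (i + 397) n) → pvCl n seed (PySem.Int.mod (i + 624) n)
  | r2 (i : Int) : 0 ≤ i → i < n → pvCl n seed (PySem.Int.mod (i + 397) n) →
      pvCl n seed (PySem.Int.mod (i + 624) n) → pvCl n seed (PySem.Int.mod (i + 1) n)
  | r3 (i : Int) : 0 ≤ i → i < n → pvCl n seed (PySem.Int.mod (i + 1) n) →
      pvCl n seed (PySem.Int.mod (i + 624) n) → pvCl n seed (PySem.Int.mod (i + 397) n)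

def pvSub (s s' : List Int) : Prop := ∀ j, 0 ≤ j → pvMem s j → pvMem s' j

def pvSound (n : Int) (seed s : List Int) : Prop := ∀ j, 0 ≤ j → pvMem s j → pvCl n seed j

def pvQok (n : Int) (q : List Int) : Prop := ∀ y ∈ q, 0 ≤ y ∧ y < n

-- every violated rule still has a triple member waiting in the stack or in C
def pvWit (n : Int) (s q C : List Int) : Prop :=
  ∀ i, 0 ≤ i → i < n → ¬ pvClosedAt n s i → (∃ y ∈ q, y ∈ pvTrip n i) ∨ i ∈ C

-- ===== generic get/set facts =====
theorem pvGetOut (s : List Int) (q : Int) (h : (s.length : Int) ≤ q) :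
    PySem.List.pyGetD s q 0 = 0 := by
  refine PySem.List.pyGetD_of_none s q 0 ((PySem.List.pyGet?_eq_none_iff s q).2 ?_)
  simp [PySem.Raise.InRange]; omega

theorem pvGetSet (s : List Int) (p q : Int) (hp0 : 0 ≤ p) (hp1 : p < s.length) (hq0 : 0 ≤ q) :
    PySem.List.pyGetD (PySem.List.pySetD s p 1) q 0 =
      if q = p then 1 else PySem.List.pyGetD s q 0 := by
  rw [PySem.List.pySetD_of_nonneg s 1 hp0]
  by_cases hq : q < s.length
  · rw [PySem.List.pyGetD_eq_getElem _ 0 hq0 (by simpa using hq),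
        PySem.List.pyGetD_eq_getElem _ 0 hq0 (by simpa [List.length_set] using hq)]
    rcases eq_or_ne q p with h | h
    · simp [h]
    · have hne : p.toNat ≠ q.toNat := by omega
      rw [List.getElem_set_ne hne, if_neg h]
  · have hne : q ≠ p := by omega
    have h1 : ((s.set p.toNat 1).length : Int) ≤ q := by rw [List.length_set]; omega
    rw [if_neg hne, pvGetOut _ _ h1, pvGetOut _ _ (by omega)]

theorem pvOk_set (n : Int) (s : List Int) (p : Int) (h : pvOk n s) (hp0 : 0 ≤ p) (hp1 : p < n) :
    pvOk n (PySem.List.pySetD s p 1) := by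
  rw [PySem.List.pySetD_of_nonneg s 1 hp0]
  refine ⟨by simpa [List.length_set] using h.1, ?_⟩
  intro k hk
  rw [List.getElem_set]
  split
  · exact Or.inr rfl
  · exact h.2 _ (by simpa [List.length_set] using hk)

theorem pvSub_set (s : List Int) (p : Int) (hp0 : 0 ≤ p) (hp1 : p < s.length) :
    pvSub s (PySem.List.pySetD s p 1) := by
  intro j hj h
  unfold pvMem at *
  rw [pvGetSet s p j hp0 hp1 hj]
  split <;> simp_all

theorem pvSub_trans {s t u : List Int} (h1 : pvSub s t) (h2 : pvSub t u) : pvSub s u :=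
  fun j hj h => h2 j hj (h1 j hj h)

theorem pvCount_set (n : Int) (s : List Int) (p : Int) (hOk : pvOk n s) (hp0 : 0 ≤ p)
    (hp1 : p < s.length) (hz : PySem.List.pyGetD s p 0 = 0) :
    (PySem.List.pySetD s p 1).count 0 + 1 = s.count 0 ∧
    (PySem.List.pySetD s p 1).count 1 = s.count 1 + 1 := by
  rw [PySem.List.pySetD_of_nonneg s 1 hp0]
  have hplen : p.toNat < s.length := by omega
  have hval : s[p.toNat] = 0 := by
    rw [PySem.List.pyGetD_eq_getElem _ 0 hp0 (by omega)] at hz; exact hz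
  constructor
  · rw [List.count_set hplen]
    simp [hval]
    have : 1 ≤ s.count 0 := List.one_le_count_iff.2 (by
      exact hval ▸ List.getElem_mem hplen)
    omega
  · rw [List.count_set hplen]
    simp [hval]

theorem pvModEq (n a j : Int) (hj0 : 0 ≤ j) (hj1 : j < n) :
    a % n = j ↔ n ∣ (a - j) := by
  constructor
  · intro h
    exact Int.dvd_of_emod_eq_zero (Int.emod_eq_emod_iff_emod_sub_eq_zero.1
      (by rw [h, Int.emod_eq_of_lt hj0 hj1]))
  · intro h
    have := Int.emod_eq_emod_iff_emod_sub_eq_zero.2 (Int.emod_eq_zero_of_dvd h)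
    rwa [Int.emod_eq_of_lt hj0 hj1] at this

theorem pvModInv (n i j c : Int) (hn : 0 < n) (hi0 : 0 ≤ i) (hi1 : i < n)
    (hj0 : 0 ≤ j) (hj1 : j < n) :
    PySem.Int.mod (i + c) n = j ↔ PySem.Int.mod (j - c) n = i := by
  rw [PySem.Int.mod_eq_emod_of_pos hn, PySem.Int.mod_eq_emod_of_pos hn,
      pvModEq n _ _ hj0 hj1, pvModEq n _ _ hi0 hi1,
      show j - c - i = -(i + c - j) by ring, Int.dvd_neg]

theorem pvTripRule (n i x : Int) (hn : 0 < n) (hi0 : 0 ≤ i) (hi1 : i < n)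
    (hx0 : 0 ≤ x) (hx1 : x < n) :
    x ∈ pvTrip n i ↔ i ∈ [PySem.Int.mod (x - 1) n, PySem.Int.mod (x - 397) n,
                          PySem.Int.mod (x - 624) n] := by
  simp only [pvTrip, List.mem_cons, List.not_mem_nil, or_false]
  constructor
  · rintro (h | h | h)
    · exact Or.inl ((pvModInv n i x 1 hn hi0 hi1 hx0 hx1).1 h.symm).symm
    · exact Or.inr (Or.inl ((pvModInv n i x 397 hn hi0 hi1 hx0 hx1).1 h.symm).symm)
    · exact Or.inr (Or.inr ((pvModInv n i x 624 hn hi0 hi1 hx0 hx1).1 h.symm).symm)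
  · rintro (h | h | h)
    · exact Or.inl ((pvModInv n i x 1 hn hi0 hi1 hx0 hx1).2 h.symm).symm
    · exact Or.inr (Or.inl ((pvModInv n i x 397 hn hi0 hi1 hx0 hx1).2 h.symm).symm)
    · exact Or.inr (Or.inr ((pvModInv n i x 624 hn hi0 hi1 hx0 hx1).2 h.symm).symm)

theorem pvTripBound (n i : Int) (hn : 0 < n) : ∀ y ∈ pvTrip n i, 0 ≤ y ∧ y < n := by
  intro y hy
  simp only [pvTrip, List.mem_cons, List.not_mem_nil, or_false] at hy
  rcases hy with h | h | h <;> subst h <;>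
    exact ⟨PySem.Int.mod_nonneg _ hn, PySem.Int.mod_lt _ hn⟩

-- ===== A-side lemmas =====
theorem pvStepA_cases (n : Int) (s : List Int) (ch : Bool) (i : Int)
    (hn : 0 < n) (hOk : pvOk n s) :
    (pvStepA n (s, ch) i = (s, ch) ∧ pvClosedAt n s i) ∨
    ∃ p, 0 ≤ p ∧ p < n ∧ PySem.List.pyGetD s p 0 = 0 ∧
      pvStepA n (s, ch) i = (PySem.List.pySetD s p 1, true) ∧
      (∀ seed, pvSound n seed s → 0 ≤ i → i < n → pvCl n seed p) := by
  have hb1 : 0 ≤ PySem.Int.mod (i+1) n ∧ PySem.Int.mod (i+1) n < n :=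
    ⟨PySem.Int.mod_nonneg (i+1) hn, PySem.Int.mod_lt (i+1) hn⟩
  have hb397 : 0 ≤ PySem.Int.mod (i+397) n ∧ PySem.Int.mod (i+397) n < n :=
    ⟨PySem.Int.mod_nonneg (i+397) hn, PySem.Int.mod_lt (i+397) hn⟩
  have hb624 : 0 ≤ PySem.Int.mod (i+624) n ∧ PySem.Int.mod (i+624) n < n :=
    ⟨PySem.Int.mod_nonneg (i+624) hn, PySem.Int.mod_lt (i+624) hn⟩
  unfold pvStepA
  simp only []
  split_ifs with h1 h2 h3 h4 h5 h6
  · refine Or.inr ⟨PySem.Int.mod (i+624) n, hb624.1, hb624.2, h2, rfl, ?_⟩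
    intro seed hS hi0 hi1
    exact pvCl.r1 i hi0 hi1 (hS _ hb1.1 h1.1) (hS _ hb397.1 h1.2)
  · exact Or.inl ⟨rfl, fun _ => h2, fun _ => h1.1, fun _ => h1.2⟩
  · refine Or.inr ⟨PySem.Int.mod (i+1) n, hb1.1, hb1.2, h4, rfl, ?_⟩
    intro seed hS hi0 hi1
    exact pvCl.r2 i hi0 hi1 (hS _ hb397.1 h3.1) (hS _ hb624.1 h3.2)
  · refine Or.inl ⟨rfl, fun h => absurd ⟨h.1, h.2⟩ h1, fun _ => h4, fun _ => h3.1⟩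
  · refine Or.inr ⟨PySem.Int.mod (i+397) n, hb397.1, hb397.2, h6, rfl, ?_⟩
    intro seed hS hi0 hi1
    exact pvCl.r3 i hi0 hi1 (hS _ hb1.1 h5.1) (hS _ hb624.1 h5.2)
  · exact Or.inl ⟨rfl, fun h => absurd ⟨h.1, h.2⟩ h1, fun h => absurd ⟨h.1, h.2⟩ h3,
      fun _ => h6⟩
  · exact Or.inl ⟨rfl, fun h => absurd ⟨h.1, h.2⟩ h1, fun h => absurd ⟨h.1, h.2⟩ h3,
      fun h => absurd ⟨h.1, h.2⟩ h5⟩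

theorem pvSweepAux (n : Int) (hn : 0 < n) (seed : List Int) (L : List Int)
    (hL : ∀ i ∈ L, 0 ≤ i ∧ i < n) :
    ∀ s ch, pvOk n s → pvSound n seed s →
    pvOk n (L.foldl (pvStepA n) (s, ch)).1 ∧
    pvSound n seed (L.foldl (pvStepA n) (s, ch)).1 ∧
    pvSub s (L.foldl (pvStepA n) (s, ch)).1 ∧
    s.count 1 ≤ (L.foldl (pvStepA n) (s, ch)).1.count 1 ∧
    (ch = true → (L.foldl (pvStepA n) (s, ch)).2 = true) ∧
    ((L.foldl (pvStepA n) (s, ch)).2 = false →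
      (L.foldl (pvStepA n) (s, ch)).1 = s ∧ ∀ i ∈ L, pvClosedAt n s i) ∧
    (ch = false → (L.foldl (pvStepA n) (s, ch)).2 = true →
      s.count 1 < (L.foldl (pvStepA n) (s, ch)).1.count 1) := by
  induction L with
  | nil =>
    intro s ch hOk hS
    exact ⟨hOk, hS, fun _ _ h => h, le_refl _, fun h => h, fun _ => ⟨rfl, by simp⟩,
      fun h h' => by simp_all⟩
  | cons x L ih =>
    intro s ch hOk hS
    have hx := hL x (by simp)
    rcases pvStepA_cases n s ch x hn hOk with ⟨heq, hcl⟩ | ⟨p, hp0, hp1, hz, heq, hClp⟩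
    · rw [List.foldl_cons, heq]
      obtain ⟨o1, o2, o3, o4, o5, o6, o7⟩ := ih (fun i hi => hL i (by simp [hi])) s ch hOk hS
      exact ⟨o1, o2, o3, o4, o5,
        fun hf => ⟨(o6 hf).1, by
          intro i hi
          rcases List.mem_cons.1 hi with rfl | hi
          · exact hcl
          · exact (o6 hf).2 i hi⟩, o7⟩
    · rw [List.foldl_cons, heq]
      have hlen : p < (s.length : Int) := by rw [hOk.1]; omega
      have hOk' : pvOk n (PySem.List.pySetD s p 1) := pvOk_set n s p hOk hp0 hp1
      have hsub : pvSub s (PySem.List.pySetD s p 1) := pvSub_set s p hp0 hlen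
      have hS' : pvSound n seed (PySem.List.pySetD s p 1) := by
        intro j hj hm
        unfold pvMem at hm
        rw [pvGetSet s p j hp0 hlen hj] at hm
        by_cases hjp : j = p
        · subst hjp; exact hClp seed hS hx.1 hx.2
        · rw [if_neg hjp] at hm; exact hS j hj hm
      have hcnt := (pvCount_set n s p hOk hp0 hlen hz).2
      obtain ⟨o1, o2, o3, o4, o5, o6, o7⟩ :=
        ih (fun i hi => hL i (by simp [hi])) (PySem.List.pySetD s p 1) true hOk' hS'
      refine ⟨o1, o2, pvSub_trans hsub o3, by omega, fun _ => o5 rfl, ?_, ?_⟩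
      · intro hf; rw [o5 rfl] at hf; exact absurd hf (by simp)
      · intro _ _; omega

theorem pvLoopA_spec (n : Int) (hn : 0 < n) (seed : List Int) :
    ∀ (fuel : Nat) (s : List Int), pvOk n s → pvSound n seed s →
      n.toNat + 1 ≤ fuel + s.count 1 →
      pvOk n (pvLoopA n s fuel) ∧ pvSound n seed (pvLoopA n s fuel) ∧
      pvSub s (pvLoopA n s fuel) ∧ pvClosed n (pvLoopA n s fuel) := by
  intro fuel
  induction fuel with
  | zero =>
    intro s hOk _ hcnt
    have := List.count_le_length (l := s) (a := (1 : Int))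
    rw [hOk.1] at this
    omega
  | succ fuel ih =>
    intro s hOk hS hcnt
    have hL : ∀ i ∈ PySem.List.pyRange 0 n 1, 0 ≤ i ∧ i < n := by
      intro i hi; exact PySem.List.mem_pyRange_one.1 hi
    obtain ⟨o1, o2, o3, o4, o5, o6, o7⟩ := pvSweepAux n hn seed _ hL s false hOk hS
    show pvOk n (pvLoopA n s (fuel+1)) ∧ _
    unfold pvLoopA
    simp only []
    by_cases hch : (pvSweepA n s).2 = true
    · rw [if_pos hch]
      have hlt := o7 rfl hch
      obtain ⟨p1, p2, p3, p4⟩ := ih (pvSweepA n s).1 o1 o2 (by unfold pvSweepA at *; omega)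
      exact ⟨p1, p2, pvSub_trans o3 p3, p4⟩
    · rw [if_neg hch]
      obtain ⟨heq, hclo⟩ := o6 (by simpa using hch)
      refine ⟨o1, o2, o3, ?_⟩
      intro i hi0 hi1
      rw [show (pvSweepA n s).1 = s from heq]
      exact hclo i (PySem.List.mem_pyRange_one.2 ⟨hi0, hi1⟩)

-- ===== B-side lemmas =====
theorem pvMissing (n i : Int) (s : List Int) (hn : 0 < n) (hOk : pvOk n s) :
    ((pvTrip n i).filter (fun p => decide (PySem.List.pyGetD s p 0 = 0)) = [] →
        pvClosedAt n s i) ∧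
    (∀ p rest, (pvTrip n i).filter (fun p => decide (PySem.List.pyGetD s p 0 = 0)) = p :: rest →
      (rest = [] → ¬ pvClosedAt n s i ∧ PySem.List.pyGetD s p 0 = 0 ∧ p ∈ pvTrip n i ∧
        (∀ seed, pvSound n seed s → 0 ≤ i → i < n → pvCl n seed p) ∧
        (∀ y ∈ pvTrip n i, y ≠ p → pvMem s y)) ∧
      (rest ≠ [] → pvClosedAt n s i)) := by
  have hb1 : 0 ≤ PySem.Int.mod (i+1) n ∧ PySem.Int.mod (i+1) n < n :=
    ⟨PySem.Int.mod_nonneg (i+1) hn, PySem.Int.mod_lt (i+1) hn⟩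
  have hb397 : 0 ≤ PySem.Int.mod (i+397) n ∧ PySem.Int.mod (i+397) n < n :=
    ⟨PySem.Int.mod_nonneg (i+397) hn, PySem.Int.mod_lt (i+397) hn⟩
  have hb624 : 0 ≤ PySem.Int.mod (i+624) n ∧ PySem.Int.mod (i+624) n < n :=
    ⟨PySem.Int.mod_nonneg (i+624) hn, PySem.Int.mod_lt (i+624) hn⟩
  by_cases hz1 : PySem.List.pyGetD s (PySem.Int.mod (i+1) n) 0 = 0 <;>
  by_cases hz2 : PySem.List.pyGetD s (PySem.Int.mod (i+397) n) 0 = 0 <;>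
  by_cases hz3 : PySem.List.pyGetD s (PySem.Int.mod (i+624) n) 0 = 0 <;>
  simp only [pvTrip, List.filter_cons, List.filter_nil, hz1, hz2, hz3, decide_true,
    decide_false, if_true, if_false, decide_eq_true_eq] <;>
  simp only [pvClosedAt, pvMem, List.cons.injEq, List.mem_cons, List.not_mem_nil, or_false]
  -- 8 cases, by how many of the three triple entries are unset
  · -- all three unset: filter = all three; any tail is nonempty, state closed vacuously
    refine ⟨by simp, ?_⟩
    intro p rest h
    obtain ⟨rfl, rfl⟩ := h
    exact ⟨by simp, fun _ => ⟨fun h => absurd h.1 (by simp [hz1]), fun h => absurd h.1 (by simp [hz2]), fun h => absurd h.1 (by simp [hz1])⟩⟩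
  · -- only i1, i397 unset
    refine ⟨by simp, ?_⟩
    intro p rest h
    obtain ⟨rfl, rfl⟩ := h
    exact ⟨by simp, fun _ => ⟨fun h => absurd h.1 (by simp [hz1]), fun h => absurd h.1 (by simp [hz2]), fun h => absurd h.1 (by simp [hz1])⟩⟩
  · -- only i1, i624 unset
    refine ⟨by simp, ?_⟩
    intro p rest h
    obtain ⟨rfl, rfl⟩ := h
    exact ⟨by simp, fun _ => ⟨fun h => absurd h.1 (by simp [hz1]), fun h => absurd h.2 (by simp [hz3]), fun h => absurd h.1 (by simp [hz1])⟩⟩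
  · -- only i1 unset: rule r2 fires
    refine ⟨by simp, ?_⟩
    intro p rest h
    obtain ⟨rfl, rfl⟩ := h
    refine ⟨fun _ => ⟨?_, hz1, by tauto, ?_, ?_⟩, by simp⟩
    · intro hc
      exact absurd (hc.2.1 ⟨hz2, hz3⟩) (by simp [hz1])
    · intro seed hS hi0 hi1
      exact pvCl.r2 i hi0 hi1 (hS _ hb397.1 hz2) (hS _ hb624.1 hz3)
    · rintro y (rfl | rfl | rfl) hne
      · exact absurd rfl hne
      · exact hz2
      · exact hz3
  · -- only i397, i624 unset
    refine ⟨by simp, ?_⟩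
    intro p rest h
    obtain ⟨rfl, rfl⟩ := h
    exact ⟨by simp, fun _ => ⟨fun h => absurd h.2 (by simp [hz2]), fun h => absurd h.1 (by simp [hz2]), fun h => absurd h.2 (by simp [hz3])⟩⟩
  · -- only i397 unset: rule r3 fires
    refine ⟨by simp, ?_⟩
    intro p rest h
    obtain ⟨rfl, rfl⟩ := h
    refine ⟨fun _ => ⟨?_, hz2, by tauto, ?_, ?_⟩, by simp⟩
    · intro hc
      exact absurd (hc.2.2 ⟨hz1, hz3⟩) (by simp [hz2])
    · intro seed hS hi0 hi1
      exact pvCl.r3 i hi0 hi1 (hS _ hb1.1 hz1) (hS _ hb624.1 hz3)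
    · rintro y (rfl | rfl | rfl) hne
      · exact hz1
      · exact absurd rfl hne
      · exact hz3
  · -- only i624 unset: rule r1 fires
    refine ⟨by simp, ?_⟩
    intro p rest h
    obtain ⟨rfl, rfl⟩ := h
    refine ⟨fun _ => ⟨?_, hz3, by tauto, ?_, ?_⟩, by simp⟩
    · intro hc
      exact absurd (hc.1 ⟨hz1, hz2⟩) (by simp [hz3])
    · intro seed hS hi0 hi1
      exact pvCl.r1 i hi0 hi1 (hS _ hb1.1 hz1) (hS _ hb397.1 hz2)
    · rintro y (rfl | rfl | rfl) hne
      · exact hz1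
      · exact hz2
      · exact absurd rfl hne
  · -- nothing unset: filter empty, closed
    exact ⟨fun _ => ⟨fun _ => hz3, fun _ => hz1, fun _ => hz2⟩, by simp⟩

theorem pvClosedAt_congr (n : Int) (s s' : List Int) (i : Int)
    (h : ∀ y ∈ pvTrip n i, PySem.List.pyGetD s' y 0 = PySem.List.pyGetD s y 0) :
    pvClosedAt n s i ↔ pvClosedAt n s' i := by
  unfold pvClosedAt pvMem
  rw [h _ (by simp [pvTrip]), h _ (by simp [pvTrip]), h _ (by simp [pvTrip])]

theorem pvFireB_step (n : Int) (hn : 0 < n) (seed s : List Int) (q : List Int) (i : Int)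
    (hi0 : 0 ≤ i) (hi1 : i < n) (hOk : pvOk n s) (hQ : pvQok n q)
    (hS : pvSound n seed s) (C : List Int) (hW : pvWit n s q (i :: C)) :
    pvOk n (pvFireB n (s, q) i).1 ∧ pvQok n (pvFireB n (s, q) i).2 ∧
    pvSound n seed (pvFireB n (s, q) i).1 ∧ pvSub s (pvFireB n (s, q) i).1 ∧
    pvWit n (pvFireB n (s, q) i).1 (pvFireB n (s, q) i).2 C ∧
    (3 * (pvFireB n (s, q) i).1.count 0 + (pvFireB n (s, q) i).2.length + 2 =
        3 * s.count 0 + q.length ∨ pvFireB n (s, q) i = (s, q)) := by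
  have htrip : [PySem.Int.mod (i + 1) n, PySem.Int.mod (i + 397) n,
      PySem.Int.mod (i + 624) n] = pvTrip n i := rfl
  obtain ⟨hnil, hcons⟩ := pvMissing n i s hn hOk
  unfold pvFireB
  simp only [htrip]
  cases hm : (pvTrip n i).filter (fun p => decide (PySem.List.pyGetD s p 0 = 0)) with
  | nil =>
    rw [if_neg (by simp : ¬ (([] : List Int).length = 1))]
    refine ⟨hOk, hQ, hS, fun _ _ h => h, ?_, Or.inr rfl⟩
    intro i₂ h0 h1 hviol
    rcases hW i₂ h0 h1 hviol with h | h
    · exact Or.inl h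
    · rcases List.mem_cons.1 h with rfl | h
      · exact absurd (hnil hm) hviol
      · exact Or.inr h
  | cons p rest =>
    cases rest with
    | cons r rest' =>
      rw [if_neg (by simp : ¬ ((p :: r :: rest').length = 1))]
      refine ⟨hOk, hQ, hS, fun _ _ h => h, ?_, Or.inr rfl⟩
      intro i₂ h0 h1 hviol
      rcases hW i₂ h0 h1 hviol with h | h
      · exact Or.inl h
      · rcases List.mem_cons.1 h with rfl | h
        · exact absurd ((hcons p (r :: rest') hm).2 (by simp)) hviol
        · exact Or.inr h
    | nil =>
      obtain ⟨hviol, hzp, hptrip, hClp, hothers⟩ := (hcons p [] hm).1 rfl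
      have hpb := pvTripBound n i hn p hptrip
      have hplen : p < (s.length : Int) := by rw [hOk.1]; omega
      rw [if_pos (by simp : ([p] : List Int).length = 1)]
      simp only [List.getD_cons_zero]
      have hOk' := pvOk_set n s p hOk hpb.1 hpb.2
      have hsub := pvSub_set s p hpb.1 hplen
      have hmm' : pvMem (PySem.List.pySetD s p 1) p := by
        unfold pvMem; rw [pvGetSet s p p hpb.1 hplen hpb.1]; simp
      refine ⟨hOk', ?_, ?_, hsub, ?_, ?_⟩
      · intro y hy
        rcases List.mem_cons.1 hy with rfl | hy
        · exact hpb
        · exact hQ y hy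
      · intro j hj hm'
        unfold pvMem at hm'
        rw [pvGetSet s p j hpb.1 hplen hj] at hm'
        by_cases hjp : j = p
        · subst hjp; exact hClp seed hS hi0 hi1
        · rw [if_neg hjp] at hm'; exact hS j hj hm'
      · intro i₂ h0 h1 hviol2
        by_cases hpt : p ∈ pvTrip n i₂
        · exact Or.inl ⟨p, by simp, hpt⟩
        · have he : ∀ y ∈ pvTrip n i₂,
              PySem.List.pyGetD (PySem.List.pySetD s p 1) y 0 = PySem.List.pyGetD s y 0 := by
            intro y hy
            have hyb := pvTripBound n i₂ hn y hy
            rw [pvGetSet s p y hpb.1 hplen hyb.1, if_neg (by rintro rfl; exact hpt hy)]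
          have hviol_s : ¬ pvClosedAt n s i₂ := fun hc =>
            hviol2 ((pvClosedAt_congr n s _ i₂ he).1 hc)
          rcases hW i₂ h0 h1 hviol_s with ⟨y, hyq, hyt⟩ | h
          · exact Or.inl ⟨y, by simp [hyq], hyt⟩
          · rcases List.mem_cons.1 h with rfl | h
            · exfalso
              apply hviol2
              have hall : ∀ y ∈ pvTrip n i₂, pvMem (PySem.List.pySetD s p 1) y := by
                intro y hy
                by_cases hyp : y = p
                · subst hyp; exact hmm'
                · have hyb := pvTripBound n i₂ hn y hy
                  exact hsub y hyb.1 (hothers y hy hyp)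
              exact ⟨fun _ => hall _ (by simp [pvTrip]),
                     fun _ => hall _ (by simp [pvTrip]),
                     fun _ => hall _ (by simp [pvTrip])⟩
            · exact Or.inr h
      · left
        have hc := (pvCount_set n s p hOk hpb.1 hplen hzp).1
        simp only [List.length_cons]
        omega

theorem pvFireB_fold (n : Int) (hn : 0 < n) (seed : List Int) :
    ∀ (R : List Int), (∀ i ∈ R, 0 ≤ i ∧ i < n) →
    ∀ s q, pvOk n s → pvQok n q → pvSound n seed s → pvWit n s q R →
    pvOk n (R.foldl (pvFireB n) (s, q)).1 ∧ pvQok n (R.foldl (pvFireB n) (s, q)).2 ∧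
    pvSound n seed (R.foldl (pvFireB n) (s, q)).1 ∧ pvSub s (R.foldl (pvFireB n) (s, q)).1 ∧
    pvWit n (R.foldl (pvFireB n) (s, q)).1 (R.foldl (pvFireB n) (s, q)).2 [] ∧
    3 * (R.foldl (pvFireB n) (s, q)).1.count 0 + (R.foldl (pvFireB n) (s, q)).2.length ≤
      3 * s.count 0 + q.length := by
  intro R
  induction R with
  | nil =>
    intro hR s q hOk hQ hS hW
    exact ⟨hOk, hQ, hS, fun _ _ h => h, hW, le_refl _⟩
  | cons i R ih =>
    intro hR s q hOk hQ hS hW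
    have hi := hR i (by simp)
    obtain ⟨o1, o2, o3, o4, o5, o6⟩ :=
      pvFireB_step n hn seed s q i hi.1 hi.2 hOk hQ hS R hW
    rw [List.foldl_cons]
    obtain ⟨p1, p2, p3, p4, p5, p6⟩ :=
      ih (fun j hj => hR j (by simp [hj])) (pvFireB n (s, q) i).1 (pvFireB n (s, q) i).2
        o1 o2 o3 o5
    simp only [Prod.mk.eta] at p1 p2 p3 p4 p5 p6
    rcases o6 with h | h
    · exact ⟨p1, p2, p3, pvSub_trans o4 p4, p5, by omega⟩
    · rw [h] at o4 p1 p2 p3 p4 p5 p6 ⊢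
      exact ⟨p1, p2, p3, pvSub_trans o4 p4, p5, by omega⟩

theorem pvLoopB_spec (n : Int) (hn : 0 < n) (seed : List Int) :
    ∀ (fuel : Nat) (s q : List Int), pvOk n s → pvQok n q → pvSound n seed s →
      pvWit n s q [] → 3 * s.count 0 + q.length < fuel →
      pvOk n (pvLoopB n s q fuel) ∧ pvSound n seed (pvLoopB n s q fuel) ∧
      pvSub s (pvLoopB n s q fuel) ∧ pvClosed n (pvLoopB n s q fuel) := by
  intro fuel
  induction fuel with
  | zero => intro s q _ _ _ _ h; omega
  | succ fuel ih =>
    intro s q hOk hQ hS hW hmeas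
    cases q with
    | nil =>
      show pvOk n s ∧ pvSound n seed s ∧ pvSub s s ∧ pvClosed n s
      refine ⟨hOk, hS, fun _ _ h => h, ?_⟩
      intro i hi0 hi1
      by_contra hviol
      rcases hW i hi0 hi1 hviol with ⟨y, hy, _⟩ | h
      · exact absurd hy (List.not_mem_nil)
      · exact absurd h (List.not_mem_nil)
    | cons x rest =>
      have hx := hQ x (by simp)
      have hR : ∀ j ∈ [PySem.Int.mod (x - 1) n, PySem.Int.mod (x - 397) n,
          PySem.Int.mod (x - 624) n], 0 ≤ j ∧ j < n := by
        intro j hj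
        rcases List.mem_cons.1 hj with rfl | hj
        · exact ⟨PySem.Int.mod_nonneg _ hn, PySem.Int.mod_lt _ hn⟩
        rcases List.mem_cons.1 hj with rfl | hj
        · exact ⟨PySem.Int.mod_nonneg _ hn, PySem.Int.mod_lt _ hn⟩
        rcases List.mem_cons.1 hj with rfl | hj
        · exact ⟨PySem.Int.mod_nonneg _ hn, PySem.Int.mod_lt _ hn⟩
        · exact absurd hj (List.not_mem_nil)
      have hQ' : pvQok n rest := fun y hy => hQ y (by simp [hy])
      have hW' : pvWit n s rest [PySem.Int.mod (x - 1) n, PySem.Int.mod (x - 397) n,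
          PySem.Int.mod (x - 624) n] := by
        intro i hi0 hi1 hviol
        rcases hW i hi0 hi1 hviol with ⟨y, hy, hyt⟩ | h
        · rcases List.mem_cons.1 hy with rfl | hy
          · exact Or.inr ((pvTripRule n i y hn hi0 hi1 hx.1 hx.2).1 hyt)
          · exact Or.inl ⟨y, hy, hyt⟩
        · exact absurd h (List.not_mem_nil)
      obtain ⟨p1, p2, p3, p4, p5, p6⟩ := pvFireB_fold n hn seed _ hR s rest hOk hQ' hS hW'
      have := ih _ _ p1 p2 p3 p5 (by simp only [List.length_cons] at hmeas; omega)
      exact ⟨this.1, this.2.1, pvSub_trans p4 this.2.2.1, this.2.2.2⟩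

-- ===== closure characterisation and the per-pair equality =====
theorem pvCl_le (n : Int) (seed t : List Int) (hsub : pvSub seed t) (hcl : pvClosed n t) :
    ∀ j, pvCl n seed j → pvMem t j := by
  intro j h
  induction h with
  | base j hj hm => exact hsub j hj hm
  | r1 i h0 h1 _ _ ih1 ih2 => exact (hcl i h0 h1).1 ⟨ih1, ih2⟩
  | r2 i h0 h1 _ _ ih1 ih2 => exact (hcl i h0 h1).2.1 ⟨ih1, ih2⟩
  | r3 i h0 h1 _ _ ih1 ih2 => exact (hcl i h0 h1).2.2 ⟨ih1, ih2⟩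

theorem pvPairEq (n a b : Int) (hn : 7 ≤ n) (ha0 : 5 ≤ a) (ha1 : a < n - 1)
    (hb0 : a < b) (hb1 : b < n - 1) :
    pvSolveA n a b = pvSolveB n a b := by
  have hn0 : 0 < n := by omega
  unfold pvSolveA pvSolveB pvInitialFlag01
  dsimp only
  -- the common seed state
  set s0 : List Int := PySem.List.pySetD (PySem.List.pySetD
      (PySem.List.pyRepeat ([1] : List Int) 5 ++ PySem.List.pyRepeat ([0] : List Int) (n - 5)) a 1) b 1 with hs0
  have hlen_init : (PySem.List.pyRepeat ([1] : List Int) 5 ++ PySem.List.pyRepeat ([0] : List Int) (n - 5)).length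
      = n.toNat := by
    rw [PySem.List.pyRepeat_singleton, PySem.List.pyRepeat_singleton]
    simp [List.length_append, List.length_replicate]
    omega
  have hOk_init : pvOk n (PySem.List.pyRepeat ([1] : List Int) 5 ++ PySem.List.pyRepeat ([0] : List Int) (n - 5)) := by
    refine ⟨hlen_init, ?_⟩
    have hmem : ∀ x ∈ (PySem.List.pyRepeat ([1] : List Int) 5 ++
        PySem.List.pyRepeat ([0] : List Int) (n - 5)), x = 0 ∨ x = 1 := by
      intro x hx
      rcases List.mem_append.1 hx with h | h
      · rw [PySem.List.pyRepeat_singleton] at h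
        exact Or.inr (List.eq_of_mem_replicate h)
      · rw [PySem.List.pyRepeat_singleton] at h
        exact Or.inl (List.eq_of_mem_replicate h)
    exact fun k hk => hmem _ (List.getElem_mem hk)
  have hOk0 : pvOk n s0 := by
    rw [hs0]
    exact pvOk_set n _ b (pvOk_set n _ a hOk_init (by omega) (by omega)) (by omega) (by omega)
  have hS0 : pvSound n s0 s0 := fun j hj hm => pvCl.base j hj hm
  obtain ⟨a1, a2, a3, a4⟩ := pvLoopA_spec n hn0 s0 (n.toNat + 1) s0 hOk0 hS0 (by omega)
  set q0 : List Int := ((PySem.List.pyRange 0 n 1).filter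
      (fun j => decide (PySem.List.pyGetD s0 j 0 ≠ 0))).reverse with hq0
  have hQ0 : pvQok n q0 := by
    intro y hy
    rw [hq0, List.mem_reverse] at hy
    exact PySem.List.mem_pyRange_one.1 (List.mem_filter.1 hy).1
  have hWitMem : ∀ y, 0 ≤ y → y < n → pvMem s0 y → y ∈ q0 := by
    intro y h0 h1 hm
    rw [hq0, List.mem_reverse]
    exact List.mem_filter.2 ⟨PySem.List.mem_pyRange_one.2 ⟨h0, h1⟩, by simpa [pvMem] using hm⟩
  have hW0 : pvWit n s0 q0 [] := by
    intro i hi0 hi1 hviol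
    left
    unfold pvClosedAt at hviol
    have hb1 := pvTripBound n i hn0 (PySem.Int.mod (i+1) n) (by simp [pvTrip])
    have hb397 := pvTripBound n i hn0 (PySem.Int.mod (i+397) n) (by simp [pvTrip])
    by_cases c1 : pvMem s0 (PySem.Int.mod (i+1) n)
    · exact ⟨_, hWitMem _ hb1.1 hb1.2 c1, by simp [pvTrip]⟩
    · by_cases c2 : pvMem s0 (PySem.Int.mod (i+397) n)
      · exact ⟨_, hWitMem _ hb397.1 hb397.2 c2, by simp [pvTrip]⟩
      · exact absurd ⟨fun h => absurd h.1 c1, fun h => absurd h.1 c2,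
          fun h => absurd h.1 c1⟩ hviol
  have hmeas : 3 * s0.count 0 + q0.length < 4 * n.toNat + 1 := by
    have h1 : s0.count 0 ≤ s0.length := List.count_le_length
    have h2 : s0.length = n.toNat := hOk0.1
    have h3 : q0.length ≤ n.toNat := by
      rw [hq0, List.length_reverse]
      calc ((PySem.List.pyRange 0 n 1).filter
              (fun j => decide (PySem.List.pyGetD s0 j 0 ≠ 0))).length
          ≤ (PySem.List.pyRange 0 n 1).length := List.length_filter_le _ _
        _ = n.toNat := by
            rw [show (n : Int) = ((n.toNat : Nat) : Int) by omega,
                PySem.List.pyRange_zero_natCast]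
            simp
            omega
    omega
  obtain ⟨b1, b2, b3, b4⟩ := pvLoopB_spec n hn0 s0 (4 * n.toNat + 1) s0 q0 hOk0 hQ0 hS0 hW0 hmeas
  set tA := pvLoopA n s0 (n.toNat + 1)
  set tB := pvLoopB n s0 q0 (4 * n.toNat + 1)
  show tA = tB
  apply List.ext_getElem (by rw [a1.1, b1.1])
  intro k h1 h2
  have hmemIff : pvMem tA (k : Int) ↔ pvMem tB (k : Int) :=
    ⟨fun h => pvCl_le n s0 tB b3 b4 _ (a2 _ (by positivity) h),
     fun h => pvCl_le n s0 tA a3 a4 _ (b2 _ (by positivity) h)⟩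
  have hgA : PySem.List.pyGetD tA (k : Int) 0 = tA[k] := by
    rw [PySem.List.pyGetD_natCast]
    exact List.getD_eq_getElem tA 0 h1
  have hgB : PySem.List.pyGetD tB (k : Int) 0 = tB[k] := by
    rw [PySem.List.pyGetD_natCast]
    exact List.getD_eq_getElem tB 0 h2
  unfold pvMem at hmemIff
  rw [hgA, hgB] at hmemIff
  rcases a1.2 k h1 with hA | hA <;> rcases b1.2 k h2 with hB | hB <;>
    rw [hA, hB] at hmemIff ⊢ <;> simp_all

-- f-image of a fold, with per-member commuting steps
theorem pvFoldHom {α β γ : Type} (f : α → γ) (g1 : α → β → α) (g2 : γ → β → γ) :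
    ∀ (L : List β) (init : α), (∀ x ∈ L, ∀ acc, f (g1 acc x) = g2 (f acc) x) →
      f (L.foldl g1 init) = L.foldl g2 (f init) := by
  intro L
  induction L with
  | nil => intro _ _; rfl
  | cons x L ih =>
    intro init h
    rw [List.foldl_cons, List.foldl_cons, ← h x (by simp) init]
    exact ih _ (fun y hy acc => h y (by simp [hy]) acc)

theorem pvMainEq (flag_len : Int) :
    find_best_enumerate_pos_2 flag_len = find_best_enumerate_pos_2_alt flag_len := by
  unfold find_best_enumerate_pos_2 find_best_enumerate_pos_2_alt
  dsimp only
  have h := pvFoldHom (α := List Int × Int × Int) (β := Int) (γ := Int × Int × Int)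
    (fun acc => ((PySem.List.count acc.1 1 : Int), acc.2.1, acc.2.2))
    (fun acc a => (PySem.List.pyRange (a + 1) (flag_len - 1) 1).foldl (fun acc b =>
        if (PySem.List.count (pvSolveA flag_len a b) 1 : Int) >
            (PySem.List.count acc.1 1 : Int) then (pvSolveA flag_len a b, a, b)
        else acc) acc)
    (fun acc a => (PySem.List.pyRange (a + 1) (flag_len - 1) 1).foldl (fun acc b =>
        if (PySem.List.count (pvSolveB flag_len a b) 1 : Int) > acc.1 then
          ((PySem.List.count (pvSolveB flag_len a b) 1 : Int), a, b)
        else acc) acc)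
    (PySem.List.pyRange 5 (flag_len - 1) 1) (([] : List Int), (0 : Int), (0 : Int)) ?_
  · rw [show ((0 : Int), (0 : Int), (0 : Int)) =
        ((fun acc : List Int × Int × Int => ((PySem.List.count acc.1 1 : Int), acc.2.1, acc.2.2))
          (([] : List Int), (0 : Int), (0 : Int))) from rfl, ← h]
  · intro a ha acc
    have hab := PySem.List.mem_pyRange_one.1 ha
    refine pvFoldHom
      (fun acc : List Int × Int × Int => ((PySem.List.count acc.1 1 : Int), acc.2.1, acc.2.2))
      (fun acc' b =>
        if (PySem.List.count (pvSolveA flag_len a b) 1 : Int) >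
            (PySem.List.count acc'.1 1 : Int) then (pvSolveA flag_len a b, a, b) else acc')
      (fun acc' b =>
        if (PySem.List.count (pvSolveB flag_len a b) 1 : Int) > acc'.1 then
          ((PySem.List.count (pvSolveB flag_len a b) 1 : Int), a, b) else acc')
      (PySem.List.pyRange (a + 1) (flag_len - 1) 1) acc ?_
    intro b hb acc'
    have hbb := PySem.List.mem_pyRange_one.1 hb
    have hE : pvSolveA flag_len a b = pvSolveB flag_len a b :=
      pvPairEq flag_len a b (by omega) (by omega) (by omega) (by omega) (by omega)
    dsimp only
    rw [← hE]
    by_cases hc : (PySem.List.count (pvSolveA flag_len a b) 1 : Int) >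
        (PySem.List.count acc'.1 1 : Int)
    · rw [if_pos hc, if_pos hc]
    · rw [if_neg hc, if_neg hc]

-- ===== VERDICT (by name: the statement is the Claim_ definition above) =====
theorem find_best_enumerate_pos_2_spec : Claim_equal_find_best_enumerate_pos_2 := by
  intro flag_len _
  unfold Spec_find_best_enumerate_pos_2
  exact pvMainEq flag_len
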